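-- pv_equiv track=rewrite | github.com/tomasnyberg/cp_notebook | codeforces/873/C.py | solve
-- ===== SOURCE A (Python) =====
-- MOD = 10**9 + 7
--
-- def solve(n, a, b):
--     a.sort()
--     b.sort()
--     ans = 1
--     j = n - 1
--     for i in range(n - 1, -1, -1):
--         while j >= 0 and a[j] > b[i]:
--             j -= 1
--         ans *= (i - j)
--         ans %= MOD
--     return ans
-- ===== SOURCE B (Python) =====
-- MOD = 10**9 + 7
--
-- def solve(n, a, b):
--     a.sort()
--     b.sort()
--     ans = 1
--     for i in range(n):
--         # upper bound: first index in [0, n) with a[idx] > b[i]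
--         x = b[i]
--         lo, hi = 0, n
--         while lo < hi:
--             mid = (lo + hi) // 2
--             if a[mid] <= x:
--                 lo = mid + 1
--             else:
--                 hi = mid
--         ans = ans * (i - lo + 1) % MOD
--     return ans
-- ===== Notes on version B (the rewrite author's own statement) =====
-- stated objective: alternative
-- what changed: Replaces A's stateful descending two-pointer sweep (a shared j pointer decremented across iterations) with an independent hand-written binary search (upper bound over a[0:n]) per element of b, iterating ascending and folding only the running product.
import Mathlib
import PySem

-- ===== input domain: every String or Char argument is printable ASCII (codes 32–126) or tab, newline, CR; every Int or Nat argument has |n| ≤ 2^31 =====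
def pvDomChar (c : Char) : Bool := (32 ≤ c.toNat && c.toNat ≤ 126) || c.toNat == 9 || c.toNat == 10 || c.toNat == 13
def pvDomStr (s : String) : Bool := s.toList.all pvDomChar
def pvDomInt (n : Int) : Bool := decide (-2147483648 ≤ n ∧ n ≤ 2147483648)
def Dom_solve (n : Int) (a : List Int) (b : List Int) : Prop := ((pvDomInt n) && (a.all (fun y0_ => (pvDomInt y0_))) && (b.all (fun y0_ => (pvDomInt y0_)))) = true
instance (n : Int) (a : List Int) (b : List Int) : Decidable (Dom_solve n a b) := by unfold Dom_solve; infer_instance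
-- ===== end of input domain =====

-- B replaces A's stateful two-pointer sweep (descending i, shared j) by an independent
-- hand-written binary search per element (ascending i): an alternative algorithm of the
-- same cost; both sort a and b in place, equivalence is about the return value.

-- ===== PORT A =====
-- the inner `while j >= 0 and a[j] > b[i]: j -= 1`
def solveWhile (sa : List Int) (x : Int) (j : Int) : Int :=
  if 0 ≤ j ∧ x < PySem.List.pyGetD sa j 0 then solveWhile sa x (j - 1) else j
termination_by (j + 1).toNat
decreasing_by omega

def solve (n : Int) (a : List Int) (b : List Int) : Int :=
  let sa := PySem.List.sorted a (fun x => x)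
  let sb := PySem.List.sorted b (fun x => x)
  let st := (PySem.List.pyRange (n - 1) (-1) (-1)).foldl
    (fun (st : Int × Int) i =>
      let j := solveWhile sa (PySem.List.pyGetD sb i 0) st.2
      (PySem.Int.mod (st.1 * (i - j)) 1000000007, j))
    (1, n - 1)
  st.1

-- ===== PORT B =====
-- the inner `while lo < hi: mid = (lo+hi)//2; …` upper-bound search of Source B
def ubLoop (sa : List Int) (x : Int) (lo hi : Int) : Int :=
  if _h : lo < hi then
    if PySem.List.pyGetD sa (PySem.Int.floordiv (lo + hi) 2) 0 ≤ x then
      ubLoop sa x (PySem.Int.floordiv (lo + hi) 2 + 1) hi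
    else
      ubLoop sa x lo (PySem.Int.floordiv (lo + hi) 2)
  else lo
termination_by (hi - lo).toNat
decreasing_by
  · have := PySem.Int.floordiv_two_mid_bounds (le_of_lt _h)
    omega
  · have h2 : PySem.Int.floordiv (lo + hi) 2 < hi := by
      rw [PySem.Int.floordiv_eq_ediv_of_pos (by norm_num)]; omega
    have := PySem.Int.floordiv_two_mid_bounds (le_of_lt _h)
    omega

def solve_alt (n : Int) (a : List Int) (b : List Int) : Int :=
  let sa := PySem.List.sorted a (fun x => x)
  let sb := PySem.List.sorted b (fun x => x)
  (PySem.List.pyRange 0 n 1).foldl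
    (fun ans i =>
      let x := PySem.List.pyGetD sb i 0
      let lo := ubLoop sa x 0 n
      PySem.Int.mod (ans * (i - lo + 1)) 1000000007)
    1

-- ===== PRECONDITION & SPEC =====
-- A raises IndexError (reading b[n-1] or a[n-1]) when n exceeds either length.
def Pre_solve (n : Int) (a : List Int) (b : List Int) : Prop :=
  n ≤ (a.length : Int) ∧ n ≤ (b.length : Int)
instance (n : Int) (a : List Int) (b : List Int) : Decidable (Pre_solve n a b) := by unfold Pre_solve; infer_instance

def pvWitness_solve : Int × List Int × List Int := (3, [2, 1, 2], [5, 2, 2])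

def Spec_solve (n : Int) (a : List Int) (b : List Int) (out : Int) : Prop := out = solve_alt n a b
instance (n : Int) (a : List Int) (b : List Int) (out : Int) : Decidable (Spec_solve n a b out) := by unfold Spec_solve; infer_instance

-- ===== CLAIM (what is proved, stated in full; the proofs are below) =====
def Claim_equal_solve : Prop := ∀ (n : Int) (a : List Int) (b : List Int), Dom_solve n a b → Pre_solve n a b → Spec_solve n a b (solve n a b)

-- ===== LEMMAS AND PROOFS =====

-- monotone access on a Pairwise-(≤) list
lemma pyGetD_mono (sa : List Int) (hs : sa.Pairwise (· ≤ ·))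
    {k l : Int} (hk : 0 ≤ k) (hkl : k ≤ l) (hl : l < (sa.length : Int)) :
    PySem.List.pyGetD sa k 0 ≤ PySem.List.pyGetD sa l 0 := by
  rw [PySem.List.pyGetD_eq_getElem sa 0 hk (by omega),
      PySem.List.pyGetD_eq_getElem sa 0 (by omega) hl]
  rcases eq_or_lt_of_le hkl with h | h
  · subst h; exact le_refl _
  · exact (List.pairwise_iff_getElem.mp hs) k.toNat l.toNat (by omega) (by omega) (by omega)

-- binary search correctness
lemma ubLoop_correct (sa : List Int) (hs : sa.Pairwise (· ≤ ·)) (x : Int) :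
    ∀ (d : Nat) (lo hi : Int), (hi - lo).toNat = d → 0 ≤ lo → lo ≤ hi → hi ≤ (sa.length : Int) →
      lo ≤ ubLoop sa x lo hi ∧ ubLoop sa x lo hi ≤ hi ∧
      (∀ k : Int, lo ≤ k → k < ubLoop sa x lo hi → PySem.List.pyGetD sa k 0 ≤ x) ∧
      (∀ k : Int, ubLoop sa x lo hi ≤ k → k < hi → x < PySem.List.pyGetD sa k 0) := by
  intro d
  induction d using Nat.strong_induction_on with
  | _ d ih =>
    intro lo hi hd h0 hlh hhi
    rw [ubLoop]
    split_ifs with h1 h2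
    · -- a[mid] ≤ x, recurse on (mid+1, hi)
      have hmid := PySem.Int.floordiv_two_mid_bounds (le_of_lt h1)
      have hmlt : PySem.Int.floordiv (lo + hi) 2 < hi := by
        rw [PySem.Int.floordiv_eq_ediv_of_pos (by norm_num)]; omega
      obtain ⟨i1, i2, i3, i4⟩ := ih (hi - (PySem.Int.floordiv (lo + hi) 2 + 1)).toNat
        (by omega) (PySem.Int.floordiv (lo + hi) 2 + 1) hi rfl (by omega) (by omega) hhi
      refine ⟨by omega, i2, ?_, i4⟩
      intro k hk1 hk2
      by_cases hk3 : PySem.Int.floordiv (lo + hi) 2 + 1 ≤ k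
      · exact i3 k hk3 hk2
      · calc PySem.List.pyGetD sa k 0
            ≤ PySem.List.pyGetD sa (PySem.Int.floordiv (lo + hi) 2) 0 :=
              pyGetD_mono sa hs (by omega) (by omega) (by omega)
          _ ≤ x := h2
    · -- x < a[mid], recurse on (lo, mid)
      have hmid := PySem.Int.floordiv_two_mid_bounds (le_of_lt h1)
      have hmlt : PySem.Int.floordiv (lo + hi) 2 < hi := by
        rw [PySem.Int.floordiv_eq_ediv_of_pos (by norm_num)]; omega
      obtain ⟨i1, i2, i3, i4⟩ := ih (PySem.Int.floordiv (lo + hi) 2 - lo).toNat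
        (by omega) lo (PySem.Int.floordiv (lo + hi) 2) rfl h0 (by omega) (by omega)
      refine ⟨i1, by omega, i3, ?_⟩
      intro k hk1 hk2
      by_cases hk3 : k < PySem.Int.floordiv (lo + hi) 2
      · exact i4 k hk1 hk3
      · calc x < PySem.List.pyGetD sa (PySem.Int.floordiv (lo + hi) 2) 0 := by omega
          _ ≤ PySem.List.pyGetD sa k 0 := pyGetD_mono sa hs (by omega) (by omega) (by omega)
    · exact ⟨le_refl _, hlh, fun k hk1 hk2 => absurd (lt_of_le_of_lt hk1 hk2) (by omega),
        fun k hk1 hk2 => absurd (lt_of_le_of_lt hk1 hk2) (by omega)⟩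

-- the while loop lands exactly at m, given a[k] > x on (m, j] and (m = -1 or a[m] ≤ x)
lemma solveWhile_eq (sa : List Int) (x : Int) (m : Int)
    (hm : -1 ≤ m) (hlow : m = -1 ∨ PySem.List.pyGetD sa m 0 ≤ x) :
    ∀ (d : Nat) (j : Int), (j - m).toNat = d → m ≤ j →
      (∀ k : Int, m < k → k ≤ j → x < PySem.List.pyGetD sa k 0) →
      solveWhile sa x j = m := by
  intro d
  induction d using Nat.strong_induction_on with
  | _ d ih =>
    intro j hd hmj hup
    rw [solveWhile]
    rcases eq_or_lt_of_le hmj with h | h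
    · subst h
      rw [if_neg]
      rcases hlow with h1 | h1
      · omega
      · simp only [not_and, not_lt]; intro _; omega
    · rw [if_pos ⟨by omega, hup j h (le_refl _)⟩]
      exact ih (j - 1 - m).toNat (by omega) (j - 1) rfl (by omega)
        (fun k hk1 hk2 => hup k hk1 (by omega))

-- modular absorption
lemma mod_mul_absorb (u v : Int) :
    PySem.Int.mod (PySem.Int.mod u 1000000007 * v) 1000000007 =
    PySem.Int.mod (u * v) 1000000007 := by
  rw [PySem.Int.mod_eq_emod_of_pos (by norm_num), PySem.Int.mod_eq_emod_of_pos (by norm_num),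
      PySem.Int.mod_eq_emod_of_pos (by norm_num)]
  conv_rhs => rw [Int.mul_emod]
  rw [Int.mul_emod, Int.emod_emod_of_dvd _ (dvd_refl _)]

-- the common factor and its running product
def pvF (sa sb : List Int) (n : Int) (i : Int) : Int :=
  i - ubLoop sa (PySem.List.pyGetD sb i 0) 0 n + 1

def pvProd (sa sb : List Int) (n : Int) : Nat → Int
  | 0 => 1
  | t + 1 => pvProd sa sb n t * pvF sa sb n (t : Int)

-- B's ascending fold computes pvProd mod M
lemma Bloop (sa sb : List Int) (n : Int) :
    ∀ t : Nat, 1 ≤ t →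
      (PySem.List.pyRange 0 (t : Int) 1).foldl
        (fun ans i =>
          PySem.Int.mod (ans * (i - ubLoop sa (PySem.List.pyGetD sb i 0) 0 n + 1)) 1000000007)
        1
      = PySem.Int.mod (pvProd sa sb n t) 1000000007 := by
  intro t
  induction t with
  | zero => omega
  | succ t iht =>
    intro _
    by_cases ht : 1 ≤ t
    · push_cast
      rw [PySem.List.pyRange_one_succ_right (by omega), List.foldl_append, iht ht]
      simp only [List.foldl_cons, List.foldl_nil]
      rw [mod_mul_absorb]
      rfl
    · have : t = 0 := by omega
      subst this
      have : ((0 : Nat) + 1 : Int) = 0 + 1 := by norm_num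
      rw [show ((0 + 1 : Nat) : Int) = 0 + 1 by norm_num, PySem.List.pyRange_one_singleton]
      simp only [List.foldl_cons, List.foldl_nil, pvProd, pvF]
      norm_num

-- A's descending fold with the two-pointer state computes the same products mod M
lemma Aloop (sa sb : List Int) (n : Int)
    (hsa : sa.Pairwise (· ≤ ·)) (hsb : sb.Pairwise (· ≤ ·))
    (hna : n ≤ (sa.length : Int)) (hnb : n ≤ (sb.length : Int)) :
    ∀ t : Nat, 1 ≤ t → (t : Int) ≤ n → ∀ j ans : Int,
      ubLoop sa (PySem.List.pyGetD sb ((t : Int) - 1) 0) 0 n - 1 ≤ j → j ≤ n - 1 →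
      ((PySem.List.pyRange ((t : Int) - 1) (-1) (-1)).foldl
        (fun (st : Int × Int) i =>
          let j := solveWhile sa (PySem.List.pyGetD sb i 0) st.2
          (PySem.Int.mod (st.1 * (i - j)) 1000000007, j))
        (ans, j)).1
      = PySem.Int.mod (ans * pvProd sa sb n t) 1000000007 := by
  intro t
  induction t with
  | zero => omega
  | succ t iht =>
    intro _ htn j ans hj1 hj2
    push_cast at hj1 htn ⊢
    rw [show ((t : Int) + 1 - 1) = (t : Int) by ring] at hj1 ⊢
    obtain ⟨u1, u2, u3, u4⟩ := ubLoop_correct sa hsa (PySem.List.pyGetD sb ((t : Nat) : Int) 0)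
      (n - 0).toNat 0 n rfl (le_refl _) (by omega) hna
    have hwhile : solveWhile sa (PySem.List.pyGetD sb ((t : Nat) : Int) 0) j
        = ubLoop sa (PySem.List.pyGetD sb ((t : Nat) : Int) 0) 0 n - 1 := by
      apply solveWhile_eq sa _ _ (by omega)
        (by
          by_cases h : ubLoop sa (PySem.List.pyGetD sb ((t : Nat) : Int) 0) 0 n = 0
          · left; omega
          · right; exact u3 _ (by omega) (by omega))
        (j - (ubLoop sa (PySem.List.pyGetD sb ((t : Nat) : Int) 0) 0 n - 1)).toNat j rfl
        (by omega)
      intro k hk1 hk2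
      exact u4 k (by omega) (by omega)
    rw [PySem.List.pyRange_neg_one_cons (show (-1 : Int) < (t : Int) by omega)]
    simp only [List.foldl_cons]
    rw [hwhile]
    by_cases ht : 1 ≤ t
    · -- monotonicity: ub at b[t-1] ≤ ub at b[t]
      obtain ⟨v1, v2, v3, v4⟩ := ubLoop_correct sa hsa (PySem.List.pyGetD sb ((t : Int) - 1) 0)
        (n - 0).toNat 0 n rfl (le_refl _) (by omega) hna
      have hble : PySem.List.pyGetD sb ((t : Int) - 1) 0 ≤ PySem.List.pyGetD sb ((t : Nat) : Int) 0 :=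
        pyGetD_mono sb hsb (by omega) (by omega) (by omega)
      have hmono : ubLoop sa (PySem.List.pyGetD sb ((t : Int) - 1) 0) 0 n
          ≤ ubLoop sa (PySem.List.pyGetD sb ((t : Nat) : Int) 0) 0 n := by
        by_contra hc
        rw [not_le] at hc
        have e1 := v3 (ubLoop sa (PySem.List.pyGetD sb ((t : Nat) : Int) 0) 0 n) u1 hc
        have e2 := u4 (ubLoop sa (PySem.List.pyGetD sb ((t : Nat) : Int) 0) 0 n) (le_refl _)
          (by omega)
        omega
      rw [iht ht (by omega) _ _ (by omega) (by omega), mod_mul_absorb]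
      congr 1
      show ans * ((t : Int) - (ubLoop sa (PySem.List.pyGetD sb ((t : Nat) : Int) 0) 0 n - 1))
          * pvProd sa sb n t = ans * (pvProd sa sb n t * pvF sa sb n (t : Int))
      unfold pvF
      ring
    · have ht0 : t = 0 := by omega
      subst ht0
      rw [show ((0 : Nat) : Int) - 1 = -1 by norm_num,
        PySem.List.pyRange_neg_one_eq_nil (le_refl (-1 : Int))]
      simp only [List.foldl_nil]
      congr 1
      show ans * (((0 : Nat) : Int) - (ubLoop sa (PySem.List.pyGetD sb ((0 : Nat) : Int) 0) 0 n - 1))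
          = ans * (pvProd sa sb n 0 * pvF sa sb n ((0 : Nat) : Int))
      unfold pvProd pvF
      ring

-- ===== VERDICT (by name: the statement is the Claim_ definition above) =====
theorem solve_spec : Claim_equal_solve := by
  intro n a b _ hpre
  obtain ⟨hna, hnb⟩ := hpre
  unfold Spec_solve solve solve_alt
  by_cases hn : n ≤ 0
  · rw [PySem.List.pyRange_neg_one_eq_nil (by omega : n - 1 ≤ -1),
      PySem.List.pyRange_one_eq_nil hn]
    simp
  · have hn1 : 1 ≤ n := by omega
    have hpa : (PySem.List.sorted a (fun x => x)).Pairwise (· ≤ ·) :=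
      PySem.List.sorted_pairwise a (fun x => x)
    have hpb : (PySem.List.sorted b (fun x => x)).Pairwise (· ≤ ·) :=
      PySem.List.sorted_pairwise b (fun x => x)
    have hla : n ≤ ((PySem.List.sorted a (fun x => x)).length : Int) := by
      rw [PySem.List.length_sorted]; exact hna
    have hlb : n ≤ ((PySem.List.sorted b (fun x => x)).length : Int) := by
      rw [PySem.List.length_sorted]; exact hnb
    have hnt : ((n.toNat : Nat) : Int) = n := Int.toNat_of_nonneg (by omega)
    obtain ⟨u1, u2, u3, u4⟩ := ubLoop_correct (PySem.List.sorted a (fun x => x)) hpa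
      (PySem.List.pyGetD (PySem.List.sorted b (fun x => x)) ((n.toNat : Int) - 1) 0)
      (n - 0).toNat 0 n rfl (le_refl _) (by omega) hla
    have hA := Aloop (PySem.List.sorted a (fun x => x)) (PySem.List.sorted b (fun x => x)) n
      hpa hpb hla hlb n.toNat (by omega) (by omega) (n - 1) 1 (by omega) (by omega)
    have hB := Bloop (PySem.List.sorted a (fun x => x)) (PySem.List.sorted b (fun x => x)) n
      n.toNat (by omega)
    rw [hnt] at hA hB
    rw [hA, hB]
    congr 1
    ring
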